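-- pv_equiv track=rewrite | github.com/ssezavar/ECE7930 | PPD/ppd_generate.py | split_epds_items
-- ===== SOURCE A (Python) =====
-- from typing import List, Dict, Any
--
-- def split_epds_items(total: int, red_flag: bool, tags: List[str]) -> List[int]:
--     base = [0]*10
--     focus = []
--     if "Anxiety" in tags: focus += [3,4]
--     if "Sleep" in tags: focus += [6]
--     if "Depression" in tags or "Bonding" in tags: focus += [7,8]
--     focus += [0,1,2,5]
--     if red_flag: focus += [9]
--     if not focus: focus = list(range(10))
--     i=0
--     while sum(base)<total and i<400:
--         base[focus[i%len(focus)]] = min(3, base[focus[i%len(focus)]]+1)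
--         i+=1
--     return base
-- ===== SOURCE B (Python) =====
-- def fill(focus, eff):
--     base = [0]*10
--     n = len(focus)
--     q, r = divmod(eff, n)
--     for j, idx in enumerate(focus):
--         base[idx] = q + (1 if j < r else 0)
--     return base
--
-- def split_epds_items(total: int, red_flag: bool, tags: list) -> list:
--     focus = []
--     if "Anxiety" in tags: focus += [3,4]
--     if "Sleep" in tags: focus += [6]
--     if "Depression" in tags or "Bonding" in tags: focus += [7,8]
--     focus += [0,1,2,5]
--     if red_flag: focus += [9]
--     return fill(focus, min(max(total, 0), 3*len(focus)))
-- ===== Notes on version B (the rewrite author's own statement) =====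
-- stated objective: simpler
-- what changed: Replaces A's token-by-token while loop (up to 400 iterations incrementing bins round-robin with a cap of 3) by a closed-form round-robin fill: clamp eff = min(max(total,0), 3*len(focus)), q, r = divmod(eff, len(focus)), and set each focus bin directly to q + (1 if its position < r else 0).
import Mathlib
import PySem

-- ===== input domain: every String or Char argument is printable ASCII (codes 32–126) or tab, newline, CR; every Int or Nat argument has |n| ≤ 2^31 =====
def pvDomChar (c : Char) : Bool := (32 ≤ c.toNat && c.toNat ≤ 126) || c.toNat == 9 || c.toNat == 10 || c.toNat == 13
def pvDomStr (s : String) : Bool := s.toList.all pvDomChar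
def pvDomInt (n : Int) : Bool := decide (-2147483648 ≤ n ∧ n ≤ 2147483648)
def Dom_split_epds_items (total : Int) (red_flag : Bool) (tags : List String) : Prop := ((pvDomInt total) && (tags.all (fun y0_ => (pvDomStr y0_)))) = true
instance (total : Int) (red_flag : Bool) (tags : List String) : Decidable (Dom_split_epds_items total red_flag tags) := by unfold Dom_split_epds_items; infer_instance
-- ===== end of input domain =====

-- B replaces A's token-by-token while loop with a closed-form round-robin fill
-- (q, r = divmod(clamped total, len(focus))); objective: simpler.

-- ===== PORT A =====
-- while-loop of A, fuel = 400 - i (the loop body runs at most 400 times because of the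
-- explicit `i < 400` guard, so fuel 400 is exact). All list indices are in range
-- (i % len(focus) < len(focus); focus entries are literals 0..9 into a 10-list),
-- so getD/set are exact for Python's base[...] reads and writes.
def loopA (f : List Nat) (total : Int) (base : List Int) (i : Nat) : Nat → List Int
  | 0 => base
  | fuel+1 =>
    if base.sum < total ∧ i < 400 then
      loopA f total (base.set (f.getD (i % f.length) 0)
        (min 3 (base.getD (f.getD (i % f.length) 0) 0 + 1))) (i+1) fuel
    else base

def split_epds_items (total : Int) (red_flag : Bool) (tags : List String) : List Int :=
  let base := List.replicate 10 (0 : Int)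
  let focus :=
    (if tags.contains "Anxiety" then [3, 4] else []) ++
    (if tags.contains "Sleep" then [6] else []) ++
    (if tags.contains "Depression" || tags.contains "Bonding" then [7, 8] else []) ++
    [0, 1, 2, 5] ++
    (if red_flag then [9] else [])
  let focus := if focus = [] then List.range 10 else focus
  loopA focus total base 0 400

-- ===== PORT B =====
-- fill(focus, eff) of Source B: q, r = divmod(eff, n); base[focus[j]] = q + (1 if j < r else 0)
def fillB (f : List Nat) (eff : Int) : List Int :=
  let base := List.replicate 10 (0 : Int)
  let n : Int := (f.length : Int)
  let q := PySem.Int.floordiv eff n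
  let r := PySem.Int.mod eff n
  (PySem.List.enumerate f).foldl (fun b p => b.set p.2 (q + if p.1 < r then 1 else 0)) base

def split_epds_items_alt (total : Int) (red_flag : Bool) (tags : List String) : List Int :=
  let focus :=
    (if tags.contains "Anxiety" then [3, 4] else []) ++
    (if tags.contains "Sleep" then [6] else []) ++
    (if tags.contains "Depression" || tags.contains "Bonding" then [7, 8] else []) ++
    [0, 1, 2, 5] ++
    (if red_flag then [9] else [])
  fillB focus (min (max total 0) (3 * (focus.length : Int)))

-- ===== PRECONDITION & SPEC =====
def Spec_split_epds_items (total : Int) (red_flag : Bool) (tags : List String) (out : List Int) : Prop := out = split_epds_items_alt total red_flag tags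
instance (total : Int) (red_flag : Bool) (tags : List String) (out : List Int) : Decidable (Spec_split_epds_items total red_flag tags out) := by unfold Spec_split_epds_items; infer_instance

-- ===== CLAIM (what is proved, stated in full; the proofs are below) =====
def Claim_equal_split_epds_items : Prop := ∀ (total : Int) (red_flag : Bool) (tags : List String), Dom_split_epds_items total red_flag tags → Spec_split_epds_items total red_flag tags (split_epds_items total red_flag tags)

-- ===== LEMMAS AND PROOFS =====

-- the body of one iteration of A's while loop
def stepA (f : List Nat) (base : List Int) (i : Nat) : List Int :=
  base.set (f.getD (i % f.length) 0) (min 3 (base.getD (f.getD (i % f.length) 0) 0 + 1))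

theorem loopA_succ (f : List Nat) (total : Int) (base : List Int) (i fuel : Nat) :
    loopA f total base i (fuel+1) =
      if base.sum < total ∧ i < 400 then loopA f total (stepA f base i) (i+1) fuel else base := rfl

theorem set_getD_self : ∀ (l : List Int) (k : Nat), k < l.length → l.set k (l.getD k 0) = l
  | _ :: _, 0, _ => by simp
  | a :: l, k+1, h => by
      have ih := set_getD_self l k (by simpa using h)
      simpa [List.getD] using ih

theorem getD_mem (f : List Nat) (hne : f ≠ []) (i : Nat) :
    f.getD (i % f.length) 0 ∈ f := by
  have hl : 0 < f.length := List.length_pos_iff.mpr hne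
  have h : i % f.length < f.length := Nat.mod_lt _ hl
  rw [List.getD_eq_getElem f 0 h]
  exact List.getElem_mem h

-- once every focus position holds 3, a step of A's loop changes nothing
theorem stepA_sat (f : List Nat) (hne : f ≠ []) (base : List Int) (i : Nat)
    (hlt : ∀ j ∈ f, j < base.length)
    (hsat : ∀ j ∈ f, base.getD j 0 = 3) :
    stepA f base i = base := by
  have hm := getD_mem f hne i
  have h3 := hsat _ hm
  unfold stepA
  rw [h3]
  have hmin : min (3 : Int) (3 + 1) = 3 := by norm_num
  rw [hmin, ← h3]
  exact set_getD_self base _ (hlt _ hm)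

-- once every focus position holds 3, further iterations of A's loop change nothing
theorem satrun (f : List Nat) (total : Int) (hne : f ≠ [])
    (base : List Int)
    (hlt : ∀ j ∈ f, j < base.length)
    (hsat : ∀ j ∈ f, base.getD j 0 = 3) :
    ∀ (fuel i : Nat), loopA f total base i fuel = base := by
  intro fuel
  induction fuel with
  | zero => intro i; rfl
  | succ fuel ih =>
    intro i
    rw [loopA_succ]
    split_ifs with h
    · rw [stepA_sat f hne base i hlt hsat, ih]
    · rfl

-- master lemma: A's loop, started from the closed-form state after e steps, ends in the
-- closed-form state after E = clamp(total) steps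
theorem master (f : List Nat) (t : Int)
    (hne : f ≠ [])
    (hb : 3 * f.length ≤ 30)
    (hfill0 : fillB f 0 = List.replicate 10 (0 : Int))
    (hstep : ∀ e : Nat, e < 3 * f.length →
        (fillB f (e : Int)).sum = (e : Int) ∧ stepA f (fillB f (e : Int)) e = fillB f ((e : Int) + 1))
    (hsatsum : (fillB f ((3 * f.length : Nat) : Int)).sum = ((3 * f.length : Nat) : Int))
    (hsatlt : ∀ j ∈ f, j < (fillB f ((3 * f.length : Nat) : Int)).length)
    (hsat : ∀ j ∈ f, (fillB f ((3 * f.length : Nat) : Int)).getD j 0 = 3) :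
    loopA f t (List.replicate 10 (0 : Int)) 0 400 = fillB f (min (max t 0) (3 * (f.length : Int))) := by
  have hc : (3 : Int) * (f.length : Int) = ((3 * f.length : Nat) : Int) := by push_cast; ring
  set N : Nat := 3 * f.length with hN
  set E : Nat := (min (max t 0) ((N : Nat) : Int)).toNat with hE
  have hEN : E ≤ N := by omega
  have hEcast : (E : Int) = min (max t 0) ((N : Nat) : Int) := by omega
  rw [hc, ← hEcast]
  have run : ∀ (fuel e : Nat), e ≤ E → 400 - e ≤ fuel →
      loopA f t (fillB f (e : Int)) e fuel = fillB f (E : Int) := by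
    intro fuel
    induction fuel with
    | zero => intro e he hf; omega
    | succ fuel ih =>
      intro e he hf
      rcases Nat.lt_or_ge e E with helt | hege
      · -- e < E: the loop takes a genuine step, to the state fill (e+1)
        have heN : e < N := Nat.lt_of_lt_of_le helt hEN
        obtain ⟨hsum, hst⟩ := hstep e heN
        have het : (e : Int) < t := by omega
        rw [loopA_succ, if_pos ⟨by rw [hsum]; exact het, by omega⟩, hst]
        have hcast1 : ((e : Int) + 1) = ((e + 1 : Nat) : Int) := by push_cast; ring
        rw [hcast1]
        exact ih (e+1) helt (by omega)
      · -- e = E: either the loop is done, or the state is saturated and nothing changes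
        have heE : e = E := le_antisymm he hege
        have hsumE : (fillB f (e : Int)).sum = (e : Int) := by
          rcases Nat.lt_or_ge e N with h | h
          · exact (hstep e h).1
          · have heqN : e = N := le_antisymm (heE ▸ hEN) h
            rw [heqN]; exact hsatsum
        rw [loopA_succ]
        split_ifs with h
        · have hEt : (e : Int) < t := by rw [← hsumE]; exact h.1
          have heqN : e = N := by omega
          have hlt' : ∀ j ∈ f, j < (fillB f (e : Int)).length := by rw [heqN]; exact hsatlt
          have hsat' : ∀ j ∈ f, (fillB f (e : Int)).getD j 0 = 3 := by rw [heqN]; exact hsat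
          rw [stepA_sat f hne _ e hlt' hsat', satrun f t hne _ hlt' hsat' fuel (e+1), heE]
        · rw [heE]
  have h0 := run 400 0 (Nat.zero_le _) (by omega)
  rw [← hfill0]
  simpa using h0

-- ===== VERDICT (by name: the statement is the Claim_ definition above) =====
theorem split_epds_items_spec : Claim_equal_split_epds_items := by
  intro total red_flag tags _dom
  cases hA : tags.contains "Anxiety" <;>
  cases hS : tags.contains "Sleep" <;>
  cases hD : (tags.contains "Depression" || tags.contains "Bonding") <;>
  cases red_flag <;>
  · simp only [Spec_split_epds_items, split_epds_items, split_epds_items_alt, hA, hS, hD,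
      Bool.false_eq_true, if_true, if_false, ite_true, ite_false, reduceIte,
      List.nil_append, List.cons_append, List.append_nil]
    exact master _ total (by decide) (by decide) (by decide)
      (by decide) (by decide) (by decide) (by decide)
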